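-- pv_equiv track=rewrite | github.com/shreyatpandey/Coding-Challenges | Amazon/OA-Sample/Kindle-Direct-Publishing/Amazon-Kindle-Publishing.py | getBalancedSplits
-- ===== SOURCE A (Python) =====
-- def getBalancedSplits(s):
--     """
--     Determines the number of ways a string consisting of '(', ')', '[', ']',
--     and '?' can be split into two non-empty substrings, such that each
--     substring can be rearranged into a balanced bracket string.
--
--     A substring can be rearranged into a balanced string if and only if:
--     1. Its length is even.
--     2. The sum of the absolute differences between the counts of open and close
--        round brackets, and open and close square brackets, is less than or
--        equal to the count of question marks.
--
--     Args:
--         s: The input string.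
--
--     Returns:
--         The number of valid split points.
--     """
--     n = len(s)
--
--     # If the total length of the string is odd, it's impossible to split it
--     # into two substrings of even length.
--     if n % 2 != 0:
--         return 0
--
--     # Precompute prefix counts for each character type.
--     # prefix_counts[k] will store the counts for the substring s[:k].
--     prefix_open_round = [0] * (n + 1)
--     prefix_close_round = [0] * (n + 1)
--     prefix_open_square = [0] * (n + 1)
--     prefix_close_square = [0] * (n + 1)
--     prefix_q_marks = [0] * (n + 1)
--
--     for i in range(n):
--         prefix_open_round[i + 1] = prefix_open_round[i]
--         prefix_close_round[i + 1] = prefix_close_round[i]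
--         prefix_open_square[i + 1] = prefix_open_square[i]
--         prefix_close_square[i + 1] = prefix_close_square[i]
--         prefix_q_marks[i + 1] = prefix_q_marks[i]
--
--         if s[i] == '(':
--             prefix_open_round[i + 1] += 1
--         elif s[i] == ')':
--             prefix_close_round[i + 1] += 1
--         elif s[i] == '[':
--             prefix_open_square[i + 1] += 1
--         elif s[i] == ']':
--             prefix_close_square[i + 1] += 1
--         elif s[i] == '?':
--             prefix_q_marks[i + 1] += 1
--
--     # Total counts for the entire string s
--     total_or = prefix_open_round[n]
--     total_cr = prefix_close_round[n]
--     total_os = prefix_open_square[n]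
--     total_cs = prefix_close_square[n]
--     total_q = prefix_q_marks[n]
--
--     count = 0
--
--     # Iterate through possible split points i.
--     # A split at index i divides the string into s[:i] and s[i:].
--     # Both substrings must be non-empty, so 1 <= i <= n-1.
--     # Both substrings must have even length. Since the total length n is even,
--     # if the first substring s[:i] has even length i, the second substring
--     # s[i:] will also have even length (n - i).
--     # So, we only need to consider even values of i from 2 to n-2.
--     for i in range(2, n, 2):
--         # Counts for the first substring s1 = s[:i]
--         or1 = prefix_open_round[i]
--         cr1 = prefix_close_round[i]
--         os1 = prefix_open_square[i]
--         cs1 = prefix_close_square[i]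
--         q1 = prefix_q_marks[i]
--         len1 = i
--
--         # Counts for the second substring s2 = s[i:]
--         or2 = total_or - or1
--         cr2 = total_cr - cr1
--         os2 = total_os - os1
--         cs2 = total_cs - cs1
--         q2 = total_q - q1
--         len2 = n - i
--
--         # Check if the first substring s1 can be rearranged into a balanced string
--         is_s1_balanceable = (len1 % 2 == 0) and (abs(cr1 - or1) + abs(cs1 - os1) <= q1)
--
--         # Check if the second substring s2 can be rearranged into a balanced string
--         is_s2_balanceable = (len2 % 2 == 0) and (abs(cr2 - or2) + abs(cs2 - os2) <= q2)
--
--         # If both substrings are balanceable, increment the count of valid splits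
--         if is_s1_balanceable and is_s2_balanceable:
--             count += 1
--
--     return count
-- ===== SOURCE B (Python) =====
-- def getBalancedSplits(s):
--     # Single backward fused scan with O(1) state instead of A's five prefix
--     # arrays + separate split loop; totals via str.count, prefix = total - suffix.
--     n = len(s)
--     if n % 2:
--         return 0
--     tr = s.count('(') - s.count(')')
--     ts = s.count('[') - s.count(']')
--     tq = s.count('?')
--     dr = ds = q = 0          # net/question counts of the suffix s[i:]
--     count = 0
--     for i in range(n - 1, 1, -1):
--         c = s[i]
--         if c == '(':
--             dr += 1
--         elif c == ')':
--             dr -= 1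
--         elif c == '[':
--             ds += 1
--         elif c == ']':
--             ds -= 1
--         elif c == '?':
--             q += 1
--         if i % 2 == 0 and abs(dr) + abs(ds) <= q and abs(tr - dr) + abs(ts - ds) <= tq - q:
--             count += 1
--     return count
-- ===== Notes on version B (the rewrite author's own statement) =====
-- stated objective: faster
-- what changed: A builds five O(n) prefix-count arrays in a forward pass and then runs a second loop over even split points reading the arrays and deriving right-half counts by total-minus-prefix; B keeps no arrays at all: it takes the three totals from str.count and does one backward fused scan from the end with O(1) running suffix state, testing each even split as it passes it (prefix counts recovered as total minus suffix).
import Mathlib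
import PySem

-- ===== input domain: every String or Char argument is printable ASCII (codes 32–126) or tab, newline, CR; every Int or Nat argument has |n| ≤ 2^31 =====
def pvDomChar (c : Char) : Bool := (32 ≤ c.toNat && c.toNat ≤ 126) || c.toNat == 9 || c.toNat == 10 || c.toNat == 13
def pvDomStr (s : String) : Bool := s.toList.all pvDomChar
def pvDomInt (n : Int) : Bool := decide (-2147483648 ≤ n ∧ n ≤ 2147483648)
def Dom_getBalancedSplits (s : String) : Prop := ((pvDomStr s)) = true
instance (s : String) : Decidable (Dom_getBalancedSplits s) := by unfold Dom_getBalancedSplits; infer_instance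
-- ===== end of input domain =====

-- B drops A's five prefix-count arrays and its second loop over split points: it takes the
-- three totals from str.count and does a single backward fused scan with O(1) running suffix
-- state, testing each even split as it passes it (objective: faster by a constant factor —
-- no per-index list allocations; measured faster in a timing run on large inputs).

-- ===== PORT A =====
-- one loop iteration of A's prefix-array construction (the five lists grow in step)
def pvStepA (st : List Int × List Int × List Int × List Int × List Int) (c : Char) :
    List Int × List Int × List Int × List Int × List Int :=
  let por := st.1
  let pcr := st.2.1
  let posq := st.2.2.1
  let pcsq := st.2.2.2.1
  let pq := st.2.2.2.2
  let vor := por.getLastD 0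
  let vcr := pcr.getLastD 0
  let vos := posq.getLastD 0
  let vcs := pcsq.getLastD 0
  let vq  := pq.getLastD 0
  if c = '(' then (por ++ [vor + 1], pcr ++ [vcr], posq ++ [vos], pcsq ++ [vcs], pq ++ [vq])
  else if c = ')' then (por ++ [vor], pcr ++ [vcr + 1], posq ++ [vos], pcsq ++ [vcs], pq ++ [vq])
  else if c = '[' then (por ++ [vor], pcr ++ [vcr], posq ++ [vos + 1], pcsq ++ [vcs], pq ++ [vq])
  else if c = ']' then (por ++ [vor], pcr ++ [vcr], posq ++ [vos], pcsq ++ [vcs + 1], pq ++ [vq])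
  else if c = '?' then (por ++ [vor], pcr ++ [vcr], posq ++ [vos], pcsq ++ [vcs], pq ++ [vq + 1])
  else (por ++ [vor], pcr ++ [vcr], posq ++ [vos], pcsq ++ [vcs], pq ++ [vq])

def getBalancedSplits (s : String) : Int :=
  let cs := s.toList
  let n : Int := (cs.length : Int)
  if PySem.Int.mod n 2 ≠ 0 then 0
  else
    let st := cs.foldl pvStepA ([0], [0], [0], [0], [0])
    let por := st.1
    let pcr := st.2.1
    let posq := st.2.2.1
    let pcsq := st.2.2.2.1
    let pq := st.2.2.2.2
    let tor := PySem.List.pyGetD por n 0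
    let tcr := PySem.List.pyGetD pcr n 0
    let tos := PySem.List.pyGetD posq n 0
    let tcs := PySem.List.pyGetD pcsq n 0
    let tq  := PySem.List.pyGetD pq n 0
    (PySem.List.pyRange 2 n 2).foldl (fun count i =>
      let or1 := PySem.List.pyGetD por i 0
      let cr1 := PySem.List.pyGetD pcr i 0
      let os1 := PySem.List.pyGetD posq i 0
      let cs1 := PySem.List.pyGetD pcsq i 0
      let q1  := PySem.List.pyGetD pq i 0
      let b1 := (PySem.Int.mod i 2 == 0) && decide (|cr1 - or1| + |cs1 - os1| ≤ q1)
      let b2 := (PySem.Int.mod (n - i) 2 == 0) &&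
        decide (|(tcr - cr1) - (tor - or1)| + |(tcs - cs1) - (tos - os1)| ≤ tq - q1)
      if b1 && b2 then count + 1 else count) 0

-- ===== PORT B =====
-- one iteration of Source B's backward scan: read s[i] (always in range in the loop), bump the
-- running suffix counters with the elif chain, then the fused split test
def pvStepB (cs : List Char) (tr ts tq : Int) (st : Int × Int × Int × Int) (i : Int) :
    Int × Int × Int × Int :=
  let c := PySem.List.pyGetD cs i ' '
  let dr := st.1
  let ds := st.2.1
  let q  := st.2.2.1
  let cnt := st.2.2.2
  let dr := if c = '(' then dr + 1 else if c = ')' then dr - 1 else dr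
  let ds := if c = '[' then ds + 1 else if c = ']' then ds - 1 else ds
  let q  := if c = '?' then q + 1 else q
  let cnt := if (PySem.Int.mod i 2 == 0) && decide (|dr| + |ds| ≤ q)
                && decide (|tr - dr| + |ts - ds| ≤ tq - q) then cnt + 1 else cnt
  (dr, ds, q, cnt)

def getBalancedSplits_alt (s : String) : Int :=
  let cs := s.toList
  let n : Int := (cs.length : Int)
  if PySem.Int.mod n 2 ≠ 0 then 0
  else
    let tr : Int := (PySem.Str.count s "(" : Int) - (PySem.Str.count s ")" : Int)
    let ts : Int := (PySem.Str.count s "[" : Int) - (PySem.Str.count s "]" : Int)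
    let tq : Int := (PySem.Str.count s "?" : Int)
    ((PySem.List.pyRange (n - 1) 1 (-1)).foldl (pvStepB cs tr ts tq) (0, 0, 0, 0)).2.2.2

-- ===== PRECONDITION & SPEC =====
def Spec_getBalancedSplits (s : String) (out : Int) : Prop := out = getBalancedSplits_alt s
instance (s : String) (out : Int) : Decidable (Spec_getBalancedSplits s out) := by unfold Spec_getBalancedSplits; infer_instance

-- ===== CLAIM (what is proved, stated in full; the proofs are below) =====
def Claim_equal_getBalancedSplits : Prop := ∀ (s : String), Dom_getBalancedSplits s → Spec_getBalancedSplits s (getBalancedSplits s)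

-- ===== LEMMAS AND PROOFS =====

-- the "array of values of g at every prefix" shape of A's five arrays
def pvArr {β : Type} (g : List Char → β) (cs : List Char) : List β :=
  (List.range (cs.length + 1)).map (fun k => g (cs.take k))

-- character counts as Int
def pvC (t : Char) (l : List Char) : Int := (l.count t : Int)

theorem pvArr_append {β : Type} (g : List Char → β) (l : List Char) (c : Char) :
    pvArr g (l ++ [c]) = pvArr g l ++ [g (l ++ [c])] := by
  unfold pvArr
  simp [List.range_succ, List.take_of_length_le]
  intro k hk
  rw [List.take_append_of_le_length (by omega)]

theorem pvArr_getLastD {β : Type} (g : List Char → β) (cs : List Char) (d : β) :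
    (pvArr g cs).getLastD d = g cs := by
  unfold pvArr
  rw [List.range_succ]
  simp

theorem pvC_append (t : Char) (l : List Char) (c : Char) :
    pvC t (l ++ [c]) = pvC t l + (if c = t then 1 else 0) := by
  unfold pvC
  rcases eq_or_ne c t with h | h <;>
    simp [List.count_append, h]

theorem pvC_cons (t x : Char) (l : List Char) :
    pvC t (x :: l) = pvC t l + (if x = t then 1 else 0) := by
  unfold pvC
  rcases eq_or_ne x t with h | h <;>
    simp [List.count_cons, h]

theorem foldA_eq (cs : List Char) :
    cs.foldl pvStepA ([0], [0], [0], [0], [0]) =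
      (pvArr (pvC '(') cs, pvArr (pvC ')') cs, pvArr (pvC '[') cs,
       pvArr (pvC ']') cs, pvArr (pvC '?') cs) := by
  induction cs using List.reverseRecOn with
  | nil => simp [pvArr, pvC]
  | append_singleton l c ih =>
      rw [List.foldl_append, ih]
      simp only [List.foldl_cons, List.foldl_nil]
      unfold pvStepA
      simp only [pvArr_getLastD, pvArr_append, pvC_append]
      by_cases h1 : c = '(' <;> by_cases h2 : c = ')' <;> by_cases h3 : c = '[' <;>
        by_cases h4 : c = ']' <;> by_cases h5 : c = '?' <;>
        simp_all

theorem pyGetD_pvArr {β : Type} (g : List Char → β) (cs : List Char) (d : β)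
    (i : Int) (h0 : 0 ≤ i) (h1 : i ≤ cs.length) :
    PySem.List.pyGetD (pvArr g cs) i d = g (cs.take i.toNat) := by
  rw [PySem.List.pyGetD_of_nonneg _ _ h0]
  unfold pvArr
  rw [PySem.List.getD_map_range _ _ _ _ (by omega)]

-- count over a prefix plus count over the suffix is the total
theorem pvC_take_drop (t : Char) (l : List Char) (k : Nat) :
    pvC t (l.take k) + pvC t (l.drop k) = pvC t l := by
  unfold pvC
  rw [← Nat.cast_add, ← List.count_append, List.take_append_drop]

-- PySem.Chars.count for a single-character needle is List.count
theorem pvCountGo_singleton (c : Char) :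
    ∀ (cs : List Char) (fuel acc : Nat), cs.length ≤ fuel →
      PySem.Chars.count.go [c] fuel cs acc = acc + cs.count c := by
  intro cs
  induction cs with
  | nil =>
      intro fuel acc _
      cases fuel <;> simp [PySem.Chars.count.go]
  | cons x t ih =>
      intro fuel acc h
      cases fuel with
      | zero => simp at h
      | succ f =>
          have ht : t.length ≤ f := by simpa using h
          simp only [PySem.Chars.count.go, List.isPrefixOf]
          rcases eq_or_ne c x with hcx | hcx
          · subst hcx
            simp [ih f (acc + 1) ht]
            omega
          · simp [hcx, ih f acc ht, hcx.symm]

theorem pvStrCount_singleton (s : String) (c : Char) (t : String) (h : t.toList = [c]) :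
    ((PySem.Str.count s t : Nat) : Int) = pvC c s.toList := by
  have h2 : PySem.Str.count s t = PySem.Chars.count s.toList [c] := by
    simp [h]
  rw [h2, show PySem.Chars.count s.toList [c]
        = PySem.Chars.count.go [c] s.toList.length s.toList 0 from rfl]
  rw [pvCountGo_singleton c s.toList s.toList.length 0 le_rfl]
  simp [pvC]

-- the condition both programs test at an even split i: prefix balanceable ∧ suffix balanceable
def pvCond (cs : List Char) (i : Int) : Bool :=
  decide (|pvC '(' (cs.take i.toNat) - pvC ')' (cs.take i.toNat)|
            + |pvC '[' (cs.take i.toNat) - pvC ']' (cs.take i.toNat)| ≤ pvC '?' (cs.take i.toNat)) &&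
  decide (|pvC '(' (cs.drop i.toNat) - pvC ')' (cs.drop i.toNat)|
            + |pvC '[' (cs.drop i.toNat) - pvC ']' (cs.drop i.toNat)| ≤ pvC '?' (cs.drop i.toNat))

-- the test Source B's backward scan applies at index i (suffix state + totals-minus-suffix)
def pvG (cs : List Char) (tr ts tq : Int) (i : Int) : Bool :=
  (PySem.Int.mod i 2 == 0) &&
  decide (|pvC '(' (cs.drop i.toNat) - pvC ')' (cs.drop i.toNat)|
            + |pvC '[' (cs.drop i.toNat) - pvC ']' (cs.drop i.toNat)| ≤ pvC '?' (cs.drop i.toNat)) &&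
  decide (|tr - (pvC '(' (cs.drop i.toNat) - pvC ')' (cs.drop i.toNat))|
            + |ts - (pvC '[' (cs.drop i.toNat) - pvC ']' (cs.drop i.toNat))| ≤ tq - pvC '?' (cs.drop i.toNat))

-- step-2 range: cons and nil forms
theorem pvRange_two_nil (a b : Int) (h : b ≤ a) : PySem.List.pyRange a b 2 = [] := by
  rw [PySem.List.pyRange_of_pos _ _ (by norm_num)]
  rw [if_neg (by omega)]
  simp

theorem pvRange_two_cons (a b : Int) (h : a < b) :
    PySem.List.pyRange a b 2 = a :: PySem.List.pyRange (a + 2) b 2 := by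
  rw [PySem.List.pyRange_of_pos _ _ (by norm_num), PySem.List.pyRange_of_pos _ _ (by norm_num)]
  rw [if_pos h]
  by_cases h2 : a + 2 < b
  · rw [if_pos h2]
    have : ((b - a + 2 - 1) / 2).toNat = ((b - (a + 2) + 2 - 1) / 2).toNat + 1 := by omega
    rw [this, List.range_succ_eq_map]
    simp [Function.comp, List.map_map]
    intro k _
    ring
  · rw [if_neg h2]
    have : ((b - a + 2 - 1) / 2).toNat = 1 := by omega
    simp [this, List.range_succ]

-- the even elements of range(a,b) are range(a,b,2), for even a
theorem pvFilter_even :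
    ∀ (k : Nat) (a b : Int), b - a ≤ k → 2 ∣ a →
      (PySem.List.pyRange a b 1).filter (fun i => PySem.Int.mod i 2 == 0) =
        PySem.List.pyRange a b 2 := by
  intro k
  induction k with
  | zero =>
      intro a b hk _
      rw [PySem.List.pyRange_one_eq_nil (by omega), pvRange_two_nil _ _ (by omega)]
      rfl
  | succ k ih =>
      intro a b hk ha
      by_cases hab : a < b
      · rw [PySem.List.pyRange_one_cons hab, pvRange_two_cons _ _ hab]
        rw [List.filter_cons]
        have hea : (PySem.Int.mod a 2 == 0) = true := by
          simp only [beq_iff_eq, PySem.Int.mod_eq_zero_iff_dvd]; exact ha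
        rw [if_pos hea]
        by_cases hab1 : a + 1 < b
        · rw [PySem.List.pyRange_one_cons hab1, List.filter_cons]
          have hoa : (PySem.Int.mod (a + 1) 2 == 0) = false := by
            have hnd : ¬ ((2:Int) ∣ (a + 1)) := by omega
            rw [Bool.eq_false_iff]
            intro hcon
            rw [beq_iff_eq, PySem.Int.mod_eq_zero_iff_dvd] at hcon
            exact hnd hcon
          rw [if_neg (by simp only [hoa]; exact Bool.false_ne_true)]
          have := ih (a + 2) b (by omega) (by omega)
          rw [show a + 1 + 1 = a + 2 by ring, this]
        · rw [PySem.List.pyRange_one_eq_nil (by omega), pvRange_two_nil _ _ (by omega)]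
          rfl
      · rw [PySem.List.pyRange_one_eq_nil (by omega), pvRange_two_nil _ _ (by omega)]
        rfl

-- A's split loop counts pvCond over the even splits
theorem foldA_count (cs : List Char) (hn : (2:Int) ∣ (cs.length : Int)) :
    (PySem.List.pyRange 2 (cs.length : Int) 2).foldl (fun count i =>
      let or1 := PySem.List.pyGetD (pvArr (pvC '(') cs) i 0
      let cr1 := PySem.List.pyGetD (pvArr (pvC ')') cs) i 0
      let os1 := PySem.List.pyGetD (pvArr (pvC '[') cs) i 0
      let cs1 := PySem.List.pyGetD (pvArr (pvC ']') cs) i 0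
      let q1  := PySem.List.pyGetD (pvArr (pvC '?') cs) i 0
      let b1 := (PySem.Int.mod i 2 == 0) && decide (|cr1 - or1| + |cs1 - os1| ≤ q1)
      let b2 := (PySem.Int.mod ((cs.length : Int) - i) 2 == 0) &&
        decide (|(PySem.List.pyGetD (pvArr (pvC ')') cs) (cs.length : Int) 0 - cr1)
                    - (PySem.List.pyGetD (pvArr (pvC '(') cs) (cs.length : Int) 0 - or1)|
                  + |(PySem.List.pyGetD (pvArr (pvC ']') cs) (cs.length : Int) 0 - cs1)
                    - (PySem.List.pyGetD (pvArr (pvC '[') cs) (cs.length : Int) 0 - os1)|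
                  ≤ PySem.List.pyGetD (pvArr (pvC '?') cs) (cs.length : Int) 0 - q1)
      if b1 && b2 then count + 1 else count) 0
    = (((PySem.List.pyRange 2 (cs.length : Int) 2).countP (pvCond cs) : Nat) : Int) := by
  rw [PySem.List.foldl_congr_mem _ _
    (fun count i => if pvCond cs i = true then count + 1 else count) 0 ?_]
  · rw [PySem.List.foldl_if_add_one, zero_add]
  · intro acc i hi
    rw [PySem.List.mem_pyRange_iff_of_pos (by norm_num)] at hi
    obtain ⟨h2i, hin, hdvd⟩ := hi
    have h0i : (0 : Int) ≤ i := by omega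
    have hlen : i ≤ (cs.length : Int) := le_of_lt hin
    simp only [pyGetD_pvArr _ _ _ _ h0i hlen,
      pyGetD_pvArr _ _ _ _ (Int.natCast_nonneg _) (le_refl _),
      Int.toNat_natCast, List.take_length]
    have hmi : PySem.Int.mod i 2 = 0 := (PySem.Int.mod_eq_zero_iff_dvd _ _).mpr (by omega)
    have hmni : PySem.Int.mod ((cs.length : Int) - i) 2 = 0 :=
      (PySem.Int.mod_eq_zero_iff_dvd _ _).mpr (by omega)
    have e1 := pvC_take_drop '(' cs i.toNat
    have e2 := pvC_take_drop ')' cs i.toNat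
    have e3 := pvC_take_drop '[' cs i.toNat
    have e4 := pvC_take_drop ']' cs i.toNat
    have e5 := pvC_take_drop '?' cs i.toNat
    refine if_congr ?_ rfl rfl
    simp only [pvCond, hmi, hmni, Bool.and_eq_true, decide_eq_true_eq, beq_self_eq_true,
      Bool.true_and]
    constructor
    · rintro ⟨ha, hb⟩
      constructor
      · rw [abs_sub_comm (pvC ')' (cs.take i.toNat)), abs_sub_comm (pvC ']' (cs.take i.toNat))] at ha
        exact ha
      · have f1 : pvC ')' cs - pvC ')' (cs.take i.toNat) - (pvC '(' cs - pvC '(' (cs.take i.toNat))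
            = pvC ')' (cs.drop i.toNat) - pvC '(' (cs.drop i.toNat) := by omega
        have f2 : pvC ']' cs - pvC ']' (cs.take i.toNat) - (pvC '[' cs - pvC '[' (cs.take i.toNat))
            = pvC ']' (cs.drop i.toNat) - pvC '[' (cs.drop i.toNat) := by omega
        have f3 : pvC '?' cs - pvC '?' (cs.take i.toNat) = pvC '?' (cs.drop i.toNat) := by omega
        rw [f1, f2, f3, abs_sub_comm (pvC ')' (cs.drop i.toNat)),
          abs_sub_comm (pvC ']' (cs.drop i.toNat))] at hb
        exact hb
    · rintro ⟨ha, hb⟩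
      constructor
      · rw [abs_sub_comm (pvC ')' (cs.take i.toNat)), abs_sub_comm (pvC ']' (cs.take i.toNat))]
        exact ha
      · have f1 : pvC ')' cs - pvC ')' (cs.take i.toNat) - (pvC '(' cs - pvC '(' (cs.take i.toNat))
            = pvC ')' (cs.drop i.toNat) - pvC '(' (cs.drop i.toNat) := by omega
        have f2 : pvC ']' cs - pvC ']' (cs.take i.toNat) - (pvC '[' cs - pvC '[' (cs.take i.toNat))
            = pvC ']' (cs.drop i.toNat) - pvC '[' (cs.drop i.toNat) := by omega
        have f3 : pvC '?' cs - pvC '?' (cs.take i.toNat) = pvC '?' (cs.drop i.toNat) := by omega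
        rw [f1, f2, f3, abs_sub_comm (pvC ')' (cs.drop i.toNat)),
          abs_sub_comm (pvC ']' (cs.drop i.toNat))]
        exact hb

-- invariant of Source B's backward scan: processing indices [m, n) right-to-left leaves the
-- suffix counters at the counts of cs.drop m and the counter at the number of good splits in [m, n)
theorem foldB_inv (cs : List Char) (tr ts tq : Int) :
    ∀ (k m : Nat), m + k = cs.length →
      (PySem.List.pyRange (m : Int) (cs.length : Int) 1).foldr
          (fun i st => pvStepB cs tr ts tq st i) (0, 0, 0, 0)
        = (pvC '(' (cs.drop m) - pvC ')' (cs.drop m),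
           pvC '[' (cs.drop m) - pvC ']' (cs.drop m),
           pvC '?' (cs.drop m),
           (((PySem.List.pyRange (m : Int) (cs.length : Int) 1).countP (pvG cs tr ts tq) : Nat) : Int)) := by
  intro k
  induction k with
  | zero =>
      intro m hm
      have hm' : m = cs.length := by omega
      subst hm'
      rw [PySem.List.pyRange_one_eq_nil (by omega)]
      simp [pvC]
  | succ k ih =>
      intro m hm
      have hmn : (m : Int) < (cs.length : Int) := by exact_mod_cast (by omega : m < cs.length)
      have hml : m < cs.length := by omega
      rw [PySem.List.pyRange_one_cons hmn]
      rw [List.foldr_cons, List.countP_cons]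
      rw [show (m : Int) + 1 = ((m + 1 : Nat) : Int) by push_cast; ring]
      rw [ih (m + 1) (by omega)]
      have hc : PySem.List.pyGetD cs (m : Int) ' ' = cs[m] := by
        rw [PySem.List.pyGetD_eq_getElem _ _ (by positivity) (by exact_mod_cast hml)]
        simp
      have hdrop : cs.drop m = cs[m] :: cs.drop (m + 1) := by
        rw [List.getElem_cons_drop]
      have d1 : pvC '(' (cs.drop m) = pvC '(' (cs.drop (m+1)) + (if cs[m] = '(' then 1 else 0) := by
        rw [hdrop, pvC_cons]
      have d2 : pvC ')' (cs.drop m) = pvC ')' (cs.drop (m+1)) + (if cs[m] = ')' then 1 else 0) := by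
        rw [hdrop, pvC_cons]
      have d3 : pvC '[' (cs.drop m) = pvC '[' (cs.drop (m+1)) + (if cs[m] = '[' then 1 else 0) := by
        rw [hdrop, pvC_cons]
      have d4 : pvC ']' (cs.drop m) = pvC ']' (cs.drop (m+1)) + (if cs[m] = ']' then 1 else 0) := by
        rw [hdrop, pvC_cons]
      have d5 : pvC '?' (cs.drop m) = pvC '?' (cs.drop (m+1)) + (if cs[m] = '?' then 1 else 0) := by
        rw [hdrop, pvC_cons]
      simp only [pvStepB, hc, pvG, Int.toNat_natCast]
      simp only [d1, d2, d3, d4, d5]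
      by_cases h1 : cs[m] = '(' <;> by_cases h2 : cs[m] = ')' <;> by_cases h3 : cs[m] = '[' <;>
        by_cases h4 : cs[m] = ']' <;> by_cases h5 : cs[m] = '?'
      all_goals simp_all
      all_goals try (refine ⟨by ring, ?_⟩)
      all_goals try simp only [add_sub_right_comm, sub_add_eq_sub_sub]
      all_goals (split_ifs <;> push_cast <;> omega)

theorem getBalancedSplits_eq (s : String) :
    getBalancedSplits s = getBalancedSplits_alt s := by
  unfold getBalancedSplits getBalancedSplits_alt
  by_cases h : PySem.Int.mod ((s.toList.length : Nat) : Int) 2 ≠ 0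
  · simp only [if_pos h]
  · simp only [if_neg h]
    rw [not_ne_iff] at h
    have hn2 : (2 : Int) ∣ ((s.toList.length : Nat) : Int) :=
      (PySem.Int.mod_eq_zero_iff_dvd _ _).mp h
    simp only [foldA_eq]
    rw [foldA_count s.toList hn2]
    rw [pvStrCount_singleton s '(' "(" (by decide), pvStrCount_singleton s ')' ")" (by decide),
        pvStrCount_singleton s '[' "[" (by decide), pvStrCount_singleton s ']' "]" (by decide),
        pvStrCount_singleton s '?' "?" (by decide)]
    rw [PySem.List.pyRange_neg_one_eq_reverse, List.foldl_reverse]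
    rw [show ((s.toList.length : Nat) : Int) - 1 + 1 = ((s.toList.length : Nat) : Int) by ring]
    by_cases h0 : s.toList.length = 0
    · rw [h0]
      norm_num [PySem.List.pyRange_one_eq_nil, pvRange_two_nil]
    · have hlen2 : 2 ≤ s.toList.length := by
        rcases hn2 with ⟨c, hc⟩
        omega
      rw [show (1 : Int) + 1 = ((2 : Nat) : Int) by norm_num]
      rw [foldB_inv s.toList _ _ _ (s.toList.length - 2) 2 (by omega)]
      rw [show ((2 : Nat) : Int) = (2 : Int) by norm_num]
      rw [← pvFilter_even s.toList.length 2 ((s.toList.length : Nat) : Int) (by omega) (by norm_num)]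
      rw [List.countP_filter]
      congr 1
      apply List.countP_congr
      intro i hi
      rw [PySem.List.mem_pyRange_one] at hi
      obtain ⟨h2i, hin⟩ := hi
      have e1 := pvC_take_drop '(' s.toList i.toNat
      have e2 := pvC_take_drop ')' s.toList i.toNat
      have e3 := pvC_take_drop '[' s.toList i.toNat
      have e4 := pvC_take_drop ']' s.toList i.toNat
      have e5 := pvC_take_drop '?' s.toList i.toNat
      have f1 : pvC '(' s.toList - pvC ')' s.toList
          - (pvC '(' (s.toList.drop i.toNat) - pvC ')' (s.toList.drop i.toNat))
          = pvC '(' (s.toList.take i.toNat) - pvC ')' (s.toList.take i.toNat) := by omega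
      have f2 : pvC '[' s.toList - pvC ']' s.toList
          - (pvC '[' (s.toList.drop i.toNat) - pvC ']' (s.toList.drop i.toNat))
          = pvC '[' (s.toList.take i.toNat) - pvC ']' (s.toList.take i.toNat) := by omega
      have f3 : pvC '?' s.toList - pvC '?' (s.toList.drop i.toNat)
          = pvC '?' (s.toList.take i.toNat) := by omega
      simp only [pvCond, pvG, Bool.and_eq_true, decide_eq_true_eq]
      rw [f1, f2, f3]
      constructor
      · rintro ⟨⟨hta, htb⟩, hev⟩
        exact ⟨⟨hev, htb⟩, hta⟩
      · rintro ⟨⟨hev, htb⟩, hta⟩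
        exact ⟨⟨hta, htb⟩, hev⟩

-- ===== VERDICT (by name: the statement is the Claim_ definition above) =====
theorem getBalancedSplits_spec : Claim_equal_getBalancedSplits := by
  intro s _
  exact getBalancedSplits_eq s
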